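-- pv_equiv track=rewrite | github.com/MackenzieWhitney1/SubtractionNim | EuclideanAlgthmBasedLogic.py | build_quotient_binary_string
-- ===== SOURCE A (Python) =====
-- def build_quotient_binary_string(a, b):
--     binary_string = ""
--     if b > a:
--         a, b = b, a
--
--     while b != 0:
--         if a // b == 1:
--             binary_string += "0"
--         else:
--             binary_string += "1"
--         a, b = b, a % b
--     return binary_string
-- ===== SOURCE B (Python) =====
-- def build_quotient_binary_string(a, b):
--     hi, lo = (b, a) if b > a else (a, b)
--     rs = [hi, lo]
--     while rs[-1] != 0:
--         rs.append(rs[-2] % rs[-1])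
--     # quotient r[i] // r[i+1] equals 1  iff  r[i] - r[i+1] == r[i+2]
--     return ''.join('0' if x - y == z else '1' for x, y, z in zip(rs, rs[1:], rs[2:]))
-- ===== Notes on version B (the rewrite author's own statement) =====
-- stated objective: alternative
-- what changed: B never computes any quotient: it builds the full Euclidean remainder sequence [r0,r1,...,0] with only %, then renders the bits in a second pass over sliding triples using the identity that the quotient r_i//r_{i+1} equals 1 iff r_i - r_{i+1} == r_{i+2}; A computes a//b in each loop step and appends to a string.
import Mathlib
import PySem

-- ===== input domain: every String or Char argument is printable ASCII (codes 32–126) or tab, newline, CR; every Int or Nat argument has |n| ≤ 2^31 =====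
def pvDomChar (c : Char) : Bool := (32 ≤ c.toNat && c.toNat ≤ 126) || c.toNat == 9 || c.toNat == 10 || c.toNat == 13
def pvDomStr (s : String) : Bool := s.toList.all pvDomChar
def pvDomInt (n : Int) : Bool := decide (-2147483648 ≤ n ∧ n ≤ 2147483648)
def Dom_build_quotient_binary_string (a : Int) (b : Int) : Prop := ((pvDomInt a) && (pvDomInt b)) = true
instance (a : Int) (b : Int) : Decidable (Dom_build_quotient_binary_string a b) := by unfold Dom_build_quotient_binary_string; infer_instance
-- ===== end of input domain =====

-- B replaces A's quotient loop by building the Euclidean remainder sequence (no floor division), then a second pass over sliding triples derives each bit via r_i - r_{i+1} = r_{i+2} ⟺ quotient 1 (alternative algorithmic mechanism, same cost).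


-- termination helper for both ports: Python's % (sign of divisor) shrinks |b|
theorem pv_mod_natAbs_lt (a b : Int) (hb : b ≠ 0) : (PySem.Int.mod a b).natAbs < b.natAbs := by
  rcases lt_or_gt_of_ne hb with h | h
  · have h1 := PySem.Int.mod_neg_bounds a h
    omega
  · have h1 := PySem.Int.mod_nonneg a h
    have h2 := PySem.Int.mod_lt a h
    omega

-- ===== PORT A =====
-- the while loop of A: appends '0'/'1' to the accumulated string each step
def buildLoopA (a b : Int) (acc : String) : String :=
  if hb : b = 0 then acc
  else buildLoopA b (PySem.Int.mod a b)
        (acc ++ (if PySem.Int.floordiv a b = 1 then "0" else "1"))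
termination_by b.natAbs
decreasing_by exact pv_mod_natAbs_lt a b hb

def build_quotient_binary_string (a : Int) (b : Int) : String :=
  if b > a then buildLoopA b a "" else buildLoopA a b ""

-- ===== PORT B =====
-- pass 1: the while loop of B, extending rs = [hi, lo] with remainders until the last entry is 0
def remB (hi lo : Int) : List Int :=
  if h : lo = 0 then [hi, lo]
  else hi :: remB lo (PySem.Int.mod hi lo)
termination_by lo.natAbs
decreasing_by exact pv_mod_natAbs_lt hi lo h

def build_quotient_binary_string_alt (a : Int) (b : Int) : String :=
  let p := if b > a then (b, a) else (a, b)
  let rs := remB p.1 p.2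
  -- pass 2: zip(rs, rs[1:], rs[2:]) and render each triple
  String.ofList (((rs.zip rs.tail).zip rs.tail.tail).map
    (fun t => if t.1.1 - t.1.2 = t.2 then '0' else '1'))

-- ===== PRECONDITION & SPEC =====
def Spec_build_quotient_binary_string (a : Int) (b : Int) (out : String) : Prop := out = build_quotient_binary_string_alt a b
instance (a : Int) (b : Int) (out : String) : Decidable (Spec_build_quotient_binary_string a b out) := by unfold Spec_build_quotient_binary_string; infer_instance

-- ===== CLAIM (what is proved, stated in full; the proofs are below) =====
def Claim_equal_build_quotient_binary_string : Prop := ∀ (a : Int) (b : Int), Dom_build_quotient_binary_string a b → Spec_build_quotient_binary_string a b (build_quotient_binary_string a b)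

-- ===== LEMMAS AND PROOFS =====
-- render pass of B, as a function of the remainder list
def renderB (rs : List Int) : List Char :=
  ((rs.zip rs.tail).zip rs.tail.tail).map (fun t => if t.1.1 - t.1.2 = t.2 then '0' else '1')

-- remB always starts with hi :: lo
theorem remB_shape (hi lo : Int) : ∃ t, remB hi lo = hi :: lo :: t := by
  fun_induction remB hi lo with
  | case1 hi => exact ⟨[], by simp⟩
  | case2 hi lo h ih =>
      obtain ⟨t, ht⟩ := ih
      exact ⟨PySem.Int.mod hi lo :: t, by rw [ht]⟩

-- the triple test r0 - r1 = r2 is exactly "quotient = 1"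
theorem quot_one_iff (a b : Int) (hb : b ≠ 0) :
    a - b = PySem.Int.mod a b ↔ PySem.Int.floordiv a b = 1 := by
  have h := PySem.Int.floordiv_mul_add_mod a b
  constructor
  · intro he
    have : (PySem.Int.floordiv a b - 1) * b = 0 := by ring_nf; omega
    rcases mul_eq_zero.mp this with h1 | h1
    · omega
    · exact absurd h1 hb
  · intro hq; rw [hq] at h; omega

theorem buildLoopA_eq (a b : Int) (acc : String) :
    buildLoopA a b acc = acc ++ String.ofList (renderB (remB a b)) := by
  fun_induction buildLoopA a b acc with
  | case1 a acc =>
      rw [remB, dif_pos rfl]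
      apply String.toList_injective
      simp [renderB]
  | case2 a b acc hb ih =>
      simp only [dite_eq_ite] at ih
      have hR : remB a b = a :: remB b (PySem.Int.mod a b) := by rw [remB, dif_neg hb]
      obtain ⟨t, ht⟩ := remB_shape b (PySem.Int.mod a b)
      rw [ih, hR, ht]
      apply String.toList_injective
      have hq := quot_one_iff a b hb
      by_cases hd : a - b = PySem.Int.mod a b <;> simp_all [renderB, List.zip]

-- ===== VERDICT (by name: the statement is the Claim_ definition above) =====
theorem build_quotient_binary_string_spec : Claim_equal_build_quotient_binary_string := by
  intro a b _
  unfold Spec_build_quotient_binary_string build_quotient_binary_string build_quotient_binary_string_alt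
  split <;> simp [buildLoopA_eq, renderB]
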